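-- pv_equiv track=rewrite | github.com/danielvoconnor/nand2tetris | Compiler/CompilationEngine.py | compile_parameterList
-- ===== SOURCE A (Python) =====
-- def xml_for_type(token):
--
--     if token in ['int','char','boolean']:
--         xml = '<keyword> ' + token + ' </keyword>'
--     else:
--         xml = '<identifier> ' + token + ' </identifier>'
--
--     return xml
--
-- def compile_parameterList(tokens):
--
--     if tokens[0] != ')':
--
--         xml = ['<parameterList>']
--         xml = xml + [xml_for_type(tokens[0]),'<identifier> ' + tokens[1] + ' </identifier>']
--         tokens = tokens[2:]
--         while tokens[0] == ',':
--             xml = xml + ['<symbol> , </symbol>',xml_for_type(tokens[1])]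
--             xml = xml + ['<identifier> ' + tokens[2] + ' </identifier>']
--             tokens = tokens[3:]
--
--         xml = xml + ['</parameterList>']
--         return xml, tokens
--
--     else:
--         xml = ['<parameterList> ', '</parameterList>']
--         return xml, tokens
-- ===== SOURCE B (Python) =====
-- def xml_for_type(token):
--     if token in ('int', 'char', 'boolean'):
--         return '<keyword> ' + token + ' </keyword>'
--     return '<identifier> ' + token + ' </identifier>'
--
-- def compile_parameterList(tokens):
--     if tokens[0] == ')':
--         return ['<parameterList> ', '</parameterList>'], tokens
--
--     # pass 1: parse (type, name) pairs with an index walk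
--     pairs = [(tokens[0], tokens[1])]
--     i = 2
--     while tokens[i] == ',':
--         pairs.append((tokens[i + 1], tokens[i + 2]))
--         i += 3
--
--     # pass 2: emit the XML from the parsed pairs
--     t0, n0 = pairs[0]
--     xml = ['<parameterList>', xml_for_type(t0), '<identifier> ' + n0 + ' </identifier>']
--     for t, n in pairs[1:]:
--         xml += ['<symbol> , </symbol>', xml_for_type(t), '<identifier> ' + n + ' </identifier>']
--     xml += ['</parameterList>']
--     return xml, tokens[i:]
-- ===== Notes on version B (the rewrite author's own statement) =====
-- stated objective: alternative
-- what changed: B splits the work into two passes: an index walk that first parses the tokens into a list of (type, name) pairs plus a consumed count, and a separate emission pass that builds the XML from those pairs, instead of A's single while-loop that repeatedly re-slices the token list while interleaving parsing and XML emission.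
import Mathlib
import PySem

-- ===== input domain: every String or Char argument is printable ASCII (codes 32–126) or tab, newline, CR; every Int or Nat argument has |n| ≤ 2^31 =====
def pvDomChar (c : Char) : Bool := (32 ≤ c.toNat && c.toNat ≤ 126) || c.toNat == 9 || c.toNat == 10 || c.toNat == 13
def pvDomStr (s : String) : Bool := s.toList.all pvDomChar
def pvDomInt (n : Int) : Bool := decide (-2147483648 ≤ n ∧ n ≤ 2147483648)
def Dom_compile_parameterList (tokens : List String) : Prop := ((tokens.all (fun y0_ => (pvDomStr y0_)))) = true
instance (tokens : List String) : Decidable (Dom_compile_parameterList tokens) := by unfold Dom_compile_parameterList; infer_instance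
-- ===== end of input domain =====

-- ===== PORT A =====
-- One honest line: B re-decomposes A into a parse pass (pairs + consumed count) and a separate
-- XML-emission pass; objective "alternative" — same result, different structure, no speed claim.
def xml_for_type (token : String) : String :=
  if token = "int" ∨ token = "char" ∨ token = "boolean" then
    "<keyword> " ++ token ++ " </keyword>"
  else
    "<identifier> " ++ token ++ " </identifier>"

-- A's while-loop: tokens[k] ported as PySem.List.pyGetD (total form; Pre_ excludes the
-- IndexError points), tokens[3:] as List.drop 3 (exact: the slice start is the literal 3 ≥ 0).
def aLoop (xml : List String) (tokens : List String) : List String × List String :=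
  if PySem.List.pyGetD tokens 0 "" = "," then
    aLoop (xml ++ ["<symbol> , </symbol>", xml_for_type (PySem.List.pyGetD tokens 1 "")]
               ++ ["<identifier> " ++ PySem.List.pyGetD tokens 2 "" ++ " </identifier>"])
          (tokens.drop 3)
  else
    (xml ++ ["</parameterList>"], tokens)
termination_by tokens.length
decreasing_by
  cases tokens with
  | nil =>
      rename_i h
      rw [PySem.List.pyGetD_zero] at h
      exact absurd h (by decide)
  | cons a l => simp only [List.length_drop, List.length_cons]; omega

def compile_parameterList (tokens : List String) : List String × List String :=
  if PySem.List.pyGetD tokens 0 "" ≠ ")" then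
    let xml := ["<parameterList>"] ++
      [xml_for_type (PySem.List.pyGetD tokens 0 ""),
       "<identifier> " ++ PySem.List.pyGetD tokens 1 "" ++ " </identifier>"]
    aLoop xml (tokens.drop 2)
  else
    (["<parameterList> ", "</parameterList>"], tokens)

-- ===== PORT B =====
-- pass 1 of Source B: walk tokens with an index, collecting (type, name) pairs; returns (pairs, i).
def bParse (tokens : List String) (i : Nat) (pairs : List (String × String)) :
    List (String × String) × Nat :=
  if PySem.List.pyGetD tokens (i : Int) "" = "," then
    bParse tokens (i + 3)
      (pairs ++ [(PySem.List.pyGetD tokens ((i : Int) + 1) "",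
                  PySem.List.pyGetD tokens ((i : Int) + 2) "")])
  else
    (pairs, i)
termination_by tokens.length - i
decreasing_by
  rename_i h
  have : i < tokens.length := by
    by_contra hn
    rw [PySem.List.pyGetD_natCast, List.getD_eq_getElem?_getD,
      List.getElem?_eq_none (by omega : tokens.length ≤ i)] at h
    exact absurd h (by decide)
  omega

-- pass 2 of Source B: emit XML from the parsed pairs (tokens[i:] with i ≥ 0 is List.drop i).
def compile_parameterList_alt (tokens : List String) : List String × List String :=
  if PySem.List.pyGetD tokens 0 "" = ")" then
    (["<parameterList> ", "</parameterList>"], tokens)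
  else
    let p := bParse tokens 2 [(PySem.List.pyGetD tokens 0 "", PySem.List.pyGetD tokens 1 "")]
    let first := p.1.getD 0 ("", "")
    let xml0 := ["<parameterList>", xml_for_type first.1,
                 "<identifier> " ++ first.2 ++ " </identifier>"]
    let xml := (p.1.drop 1).foldl
      (fun acc tn =>
        acc ++ ["<symbol> , </symbol>", xml_for_type tn.1,
                "<identifier> " ++ tn.2 ++ " </identifier>"]) xml0
    (xml ++ ["</parameterList>"], tokens.drop p.2)

-- ===== PRECONDITION & SPEC =====
-- Pre_ excludes exactly the inputs where the Python A raises IndexError: the empty list, and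
-- truncated parameter lists (a type without a name, or a trailing ',' without a following pair,
-- or a parameter list that ends without any closing token after the last name).
def Pre_compile_parameterList (tokens : List String) : Prop :=
  tokens ≠ [] ∧
  (tokens.getD 0 "" = ")" ∨
    ∃ k < tokens.length, 3 * k + 3 ≤ tokens.length ∧
      (∀ j < k, tokens.getD (3 * j + 2) "" = ",") ∧
      tokens.getD (3 * k + 2) "" ≠ ",")

instance (tokens : List String) : Decidable (Pre_compile_parameterList tokens) := by
  unfold Pre_compile_parameterList; infer_instance

def pvWitness_compile_parameterList : List String := ["int", "x", ",", "char", "y", ")"]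

def Spec_compile_parameterList (tokens : List String) (out : List String × List String) : Prop := out = compile_parameterList_alt tokens
instance (tokens : List String) (out : List String × List String) : Decidable (Spec_compile_parameterList tokens out) := by unfold Spec_compile_parameterList; infer_instance

-- ===== CLAIM (what is proved, stated in full; the proofs are below) =====
def Claim_equal_compile_parameterList : Prop := ∀ (tokens : List String), Dom_compile_parameterList tokens → Pre_compile_parameterList tokens → Spec_compile_parameterList tokens (compile_parameterList tokens)

-- ===== LEMMAS AND PROOFS =====

-- Proof-side characterisation of the loop region: the pairs it reads and the tokens it consumes.
def pairsOf : List String → List (String × String)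
  | [] => []
  | t0 :: rest =>
      if t0 = "," then (rest.getD 0 "", rest.getD 1 "") :: pairsOf (rest.drop 2) else []
termination_by ts => ts.length
decreasing_by simp only [List.length_drop, List.length_cons]; omega

def consumeOf : List String → Nat
  | [] => 0
  | t0 :: rest => if t0 = "," then 3 + consumeOf (rest.drop 2) else 0
termination_by ts => ts.length
decreasing_by simp only [List.length_drop, List.length_cons]; omega

def emitPairs (ps : List (String × String)) : List String :=
  ps.flatMap (fun tn =>
    ["<symbol> , </symbol>", xml_for_type tn.1,
     "<identifier> " ++ tn.2 ++ " </identifier>"])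

theorem aLoop_eq (n : Nat) : ∀ (ts : List String), ts.length ≤ n → ∀ xml,
    aLoop xml ts =
      (xml ++ emitPairs (pairsOf ts) ++ ["</parameterList>"], ts.drop (consumeOf ts)) := by
  induction n with
  | zero =>
      intro ts hts xml
      have : ts = [] := List.eq_nil_of_length_eq_zero (by omega)
      subst this
      rw [aLoop]
      simp [PySem.List.pyGetD_zero, pairsOf, consumeOf, emitPairs]
  | succ n ih =>
      intro ts hts xml
      cases ts with
      | nil =>
          rw [aLoop]
          simp [PySem.List.pyGetD_zero, pairsOf, consumeOf, emitPairs]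
      | cons t0 rest =>
          rw [aLoop]
          by_cases h : t0 = ","
          · rw [if_pos (by simp [PySem.List.pyGetD_zero_cons, h])]
            have hlen : (rest.drop 2).length ≤ n := by
              simp only [List.length_drop]
              simp only [List.length_cons] at hts
              omega
            rw [show ((t0 :: rest).drop 3) = rest.drop 2 from rfl]
            rw [ih (rest.drop 2) hlen]
            rw [pairsOf, consumeOf, if_pos h, if_pos h]
            have h1 : PySem.List.pyGetD (t0 :: rest) 1 "" = rest.getD 0 "" := by
              rw [show ((1 : Int)) = ((1 : Nat) : Int) from rfl, PySem.List.pyGetD_natCast]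
              simp [List.getD]
            have h2 : PySem.List.pyGetD (t0 :: rest) 2 "" = rest.getD 1 "" := by
              rw [show ((2 : Int)) = ((2 : Nat) : Int) from rfl, PySem.List.pyGetD_natCast]
              simp [List.getD]
            rw [h1, h2]
            refine Prod.ext ?_ ?_
            · simp [emitPairs, List.append_assoc]
            · simp only []
              rw [List.drop_drop]
              have : 3 + consumeOf (rest.drop 2) = (consumeOf (rest.drop 2) + 2) + 1 := by omega
              rw [this, List.drop_succ_cons]
              congr 1
              omega
          · rw [if_neg (by simp [PySem.List.pyGetD_zero_cons, h])]
            rw [pairsOf, consumeOf, if_neg h, if_neg h]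
            simp [emitPairs]

theorem bParse_eq (n : Nat) : ∀ (ts : List String) (i : Nat) (acc : List (String × String)),
    ts.length - i ≤ n →
    bParse ts i acc = (acc ++ pairsOf (ts.drop i), i + consumeOf (ts.drop i)) := by
  induction n with
  | zero =>
      intro ts i acc h
      have hge : ts.length ≤ i := by omega
      rw [bParse]
      rw [if_neg ?_]
      · rw [List.drop_eq_nil_of_le hge, pairsOf, consumeOf]
        simp
      · rw [PySem.List.pyGetD_natCast, List.getD_eq_getElem?_getD,
          List.getElem?_eq_none hge]
        decide
  | succ n ih =>
      intro ts i acc h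
      rw [bParse]
      by_cases hc : PySem.List.pyGetD ts (i : Int) "" = ","
      · rw [if_pos hc]
        have hi : i < ts.length := by
          by_contra hn
          rw [PySem.List.pyGetD_natCast, List.getD_eq_getElem?_getD,
            List.getElem?_eq_none (by omega : ts.length ≤ i)] at hc
          exact absurd hc (by decide)
        rw [ih ts (i + 3) _ (by omega)]
        -- shape of the remaining tokens
        have hdi : ts.drop i = "," :: ts.drop (i + 1) := by
          have hcons := List.getElem_cons_drop (as := ts) (h := hi)
          rw [PySem.List.pyGetD_natCast, List.getD_eq_getElem?_getD,
            List.getElem?_eq_getElem hi] at hc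
          simp at hc
          rw [← hcons, hc]
        have hstep : ts.drop (i + 3) = (ts.drop (i + 1)).drop 2 := by
          rw [List.drop_drop]
        have hg1 : PySem.List.pyGetD ts ((i : Int) + 1) "" = (ts.drop (i + 1)).getD 0 "" := by
          rw [show ((i : Int) + 1) = (((i + 1 : Nat)) : Int) by push_cast; ring,
            PySem.List.pyGetD_natCast]
          simp [List.getD_eq_getElem?_getD, List.getElem?_drop]
        have hg2 : PySem.List.pyGetD ts ((i : Int) + 2) "" = (ts.drop (i + 1)).getD 1 "" := by
          rw [show ((i : Int) + 2) = (((i + 2 : Nat)) : Int) by push_cast; ring,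
            PySem.List.pyGetD_natCast]
          simp [List.getD_eq_getElem?_getD, List.getElem?_drop]
        rw [hdi, pairsOf, consumeOf, if_pos rfl, if_pos rfl, ← hstep, hg1, hg2]
        refine Prod.ext ?_ ?_
        · simp [List.append_assoc]
        · simp only []
          omega
      · rw [if_neg hc]
        cases hd : ts.drop i with
        | nil => rw [pairsOf, consumeOf]; simp
        | cons a l =>
            have ha : a ≠ "," := by
              intro hae
              apply hc
              have hi : i < ts.length := by
                by_contra hn
                rw [List.drop_eq_nil_of_le (by omega)] at hd
                simp at hd
              rw [PySem.List.pyGetD_natCast, List.getD_eq_getElem?_getD,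
                List.getElem?_eq_getElem hi]
              have hcons := List.getElem_cons_drop (as := ts) (h := hi)
              rw [hd] at hcons
              injection hcons with h1 _
              simp [h1, hae]
            rw [pairsOf, consumeOf, if_neg ha, if_neg ha]
            simp

theorem foldl_emit (ps : List (String × String)) : ∀ acc,
    ps.foldl (fun acc tn =>
      acc ++ ["<symbol> , </symbol>", xml_for_type tn.1,
              "<identifier> " ++ tn.2 ++ " </identifier>"]) acc = acc ++ emitPairs ps := by
  induction ps with
  | nil => intro acc; simp [emitPairs]
  | cons p ps ih => intro acc; simp [emitPairs, ih, List.append_assoc]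

theorem ab_eq (tokens : List String) :
    compile_parameterList tokens = compile_parameterList_alt tokens := by
  unfold compile_parameterList compile_parameterList_alt
  by_cases h0 : PySem.List.pyGetD tokens 0 "" = ")"
  · rw [if_neg (by simp [h0]), if_pos h0]
  · have hb := bParse_eq tokens.length tokens 2
      [(PySem.List.pyGetD tokens 0 "", PySem.List.pyGetD tokens 1 "")] (by omega)
    have ha := aLoop_eq (tokens.drop 2).length (tokens.drop 2) (le_refl _)
    rw [if_pos h0, if_neg h0, ha]
    simp only [hb, List.singleton_append, List.drop_succ_cons, List.drop_zero,
      List.getD_cons_zero, foldl_emit]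
    refine Prod.ext ?_ ?_
    · simp
    · simp [List.drop_drop]

-- ===== VERDICT (by name: the statement is the Claim_ definition above) =====
theorem compile_parameterList_spec : Claim_equal_compile_parameterList := by
  intro tokens _ _
  unfold Spec_compile_parameterList
  exact ab_eq tokens
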